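-- pv_equiv track=rewrite | github.com/jeremytrimble/speaknspell_analysis | src/spana/live_trace.py | takeskip
-- ===== SOURCE A (Python) =====
-- def takeskip(it, take:int, skip:int):
--     it = iter(it)
--     try:
--         while True:
--             for _ in range(take):
--                 yield next(it)
--             for _ in range(skip):
--                 next(it)
--     except StopIteration:
--         return
-- ===== SOURCE B (Python) =====
-- def takeskip(it, take: int, skip: int):
--     # Single flat pass with a phase counter instead of nested chunked range loops.
--     it = iter(it)
--     c = 0
--     while True:
--         try:
--             x = next(it)
--         except StopIteration:
--             return
--         if c < take:
--             yield x
--         c += 1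
--         if c >= take + skip:
--             c = 0
-- ===== Notes on version B (the rewrite author's own statement) =====
-- stated objective: simpler
-- what changed: A single flat loop pulls one element per iteration and decides yield/skip with a phase counter reset at take+skip, replacing A's outer while with two nested chunk-consuming range loops; Pre_ excludes take<=0 and skip<=0, where A loops forever without consuming and thus never returns.
import Mathlib
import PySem

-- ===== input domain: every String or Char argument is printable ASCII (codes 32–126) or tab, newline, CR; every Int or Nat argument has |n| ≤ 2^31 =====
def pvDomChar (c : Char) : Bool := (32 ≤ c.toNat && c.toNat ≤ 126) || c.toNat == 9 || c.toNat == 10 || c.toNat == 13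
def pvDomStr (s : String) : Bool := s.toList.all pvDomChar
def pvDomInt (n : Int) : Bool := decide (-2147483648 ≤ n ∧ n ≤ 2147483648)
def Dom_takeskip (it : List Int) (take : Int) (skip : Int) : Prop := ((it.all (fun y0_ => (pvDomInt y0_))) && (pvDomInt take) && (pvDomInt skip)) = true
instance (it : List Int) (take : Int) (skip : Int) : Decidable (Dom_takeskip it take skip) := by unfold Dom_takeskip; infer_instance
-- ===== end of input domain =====

-- B replaces A's nested chunked range loops with one flat pass driven by a
-- phase counter (simpler decomposition); Pre_ excludes take ≤ 0 ∧ skip ≤ 0,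
-- where A loops forever without consuming and never returns.


-- ===== PORT A =====
-- One iteration of A's `while True` body per recursive call:
-- `for _ in range(take): yield next(it)` yields the next take.toNat elements
-- (range of a negative int is empty, as Int.toNat clamps); if the iterator is
-- exhausted mid-phase, StopIteration ends the generator with what was yielded.
-- Then `for _ in range(skip): next(it)` drops skip.toNat elements likewise.
-- The fuel parameter only bounds the Python-divergent case take ≤ 0 ∧ skip ≤ 0
-- (excluded by Pre_takeskip); with take.toNat + skip.toNat ≥ 1 each round
-- consumes ≥ 1 element, so fuel it.length + 1 never runs out.
def takeskipA_go (take skip : Int) : Nat → List Int → List Int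
  | 0, _ => []
  | f + 1, l =>
    if l.length < take.toNat then l
    else
      let rest := l.drop take.toNat
      if rest.length < skip.toNat then l.take take.toNat
      else l.take take.toNat ++ takeskipA_go take skip f (rest.drop skip.toNat)

def takeskip (it : List Int) (take : Int) (skip : Int) : List Int :=
  takeskipA_go take skip (it.length + 1) it

-- ===== PORT B =====
-- B's flat while-True loop: one element per iteration, counter c yields iff
-- c < take, increments, and resets to 0 once c ≥ take + skip.
def takeskipB_go (take skip : Int) (l : List Int) (c : Int) : List Int :=
  match l with
  | [] => []
  | x :: xs =>
    let out := if c < take then [x] else []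
    let c1 := c + 1
    let c2 := if take + skip ≤ c1 then 0 else c1
    out ++ takeskipB_go take skip xs c2

def takeskip_alt (it : List Int) (take : Int) (skip : Int) : List Int :=
  takeskipB_go take skip it 0

-- ===== PRECONDITION & SPEC =====
-- When take ≤ 0 and skip ≤ 0, A's while loop never calls next and never
-- terminates (the generator diverges, returning nothing); Pre_ excludes
-- exactly those inputs.
def Pre_takeskip (_it : List Int) (take : Int) (skip : Int) : Prop :=
  0 < take ∨ 0 < skip
instance (it : List Int) (take : Int) (skip : Int) : Decidable (Pre_takeskip it take skip) := by
  unfold Pre_takeskip; infer_instance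
def pvWitness_takeskip : List Int × Int × Int := ([1, 2, 3, 4, 5], 2, 1)

def Spec_takeskip (it : List Int) (take : Int) (skip : Int) (out : List Int) : Prop := out = takeskip_alt it take skip
instance (it : List Int) (take : Int) (skip : Int) (out : List Int) : Decidable (Spec_takeskip it take skip out) := by unfold Spec_takeskip; infer_instance

-- ===== CLAIM (what is proved, stated in full; the proofs are below) =====
def Claim_equal_takeskip : Prop := ∀ (it : List Int) (take : Int) (skip : Int), Dom_takeskip it take skip → Pre_takeskip it take skip → Spec_takeskip it take skip (takeskip it take skip)

-- ===== LEMMAS AND PROOFS =====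

-- Case take ≤ 0, skip ≥ 1: A drops skip.toNat elements per round, yields none.
theorem goA_take_nonpos (take skip : Int) (ht : take ≤ 0) (hs : 0 < skip) :
    ∀ f l, List.length l < f → takeskipA_go take skip f l = [] := by
  intro f
  induction f with
  | zero => intro l h; omega
  | succ f ih =>
    intro l h
    have ht0 : take.toNat = 0 := by omega
    have hs0 : 0 < skip.toNat := by omega
    simp only [takeskipA_go, ht0, List.drop_zero, List.take_zero]
    split
    · omega
    · split
      · rfl
      · rename_i h1 h2
        have : (List.drop skip.toNat l).length < f := by
          simp only [List.length_drop] at *; omega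
        simpa using ih _ this

-- Case take ≤ 0: B never yields (the counter stays ≥ 0, never < take).
theorem goB_take_nonpos (take skip : Int) (ht : take ≤ 0) :
    ∀ l c, 0 ≤ c → takeskipB_go take skip l c = [] := by
  intro l
  induction l with
  | nil => intro c _; rfl
  | cons x xs ih =>
    intro c hc
    simp only [takeskipB_go]
    have : ¬ c < take := by omega
    simp only [this, if_false, List.nil_append]
    split
    · exact ih 0 le_rfl
    · exact ih (c + 1) (by omega)

-- Case take ≥ 1, skip ≤ 0: A yields every round's chunk and drops none.
theorem goA_skip_nonpos (take skip : Int) (ht : 0 < take) (hs : skip ≤ 0) :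
    ∀ f l, List.length l < f → takeskipA_go take skip f l = l := by
  intro f
  induction f with
  | zero => intro l h; omega
  | succ f ih =>
    intro l h
    have hs0 : skip.toNat = 0 := by omega
    have ht0 : 0 < take.toNat := by omega
    simp only [takeskipA_go, hs0, List.drop_zero]
    split
    · rfl
    · split
      · rename_i h1 h2
        simp only [List.length_drop] at h2; omega
      · rename_i h1 h2
        have : (List.drop take.toNat l).length < f := by
          simp only [List.length_drop]; omega
        rw [ih _ this, List.take_append_drop]

-- Case take ≥ 1, skip ≤ 0: B yields every element (counter stays in [0, take)).
theorem goB_skip_nonpos (take skip : Int) (ht : 0 < take) (hs : skip ≤ 0) :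
    ∀ l c, 0 ≤ c → c < take → takeskipB_go take skip l c = l := by
  intro l
  induction l with
  | nil => intro c _ _; rfl
  | cons x xs ih =>
    intro c hc hct
    simp only [takeskipB_go, if_pos hct]
    split
    · rw [ih 0 le_rfl ht]; rfl
    · rename_i hr
      rw [ih (c + 1) (by omega) (by omega)]; rfl

-- Main case take ≥ 1, skip ≥ 1: B's take phase — from counter c < take it
-- yields the next (take - c).toNat elements and reaches counter = take.
theorem goB_take_phase (take skip : Int) (hs : 0 < skip) :
    ∀ l c, 0 ≤ c → c < take →
      takeskipB_go take skip l c =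
        l.take (take - c).toNat ++ takeskipB_go take skip (l.drop (take - c).toNat) take := by
  intro l
  induction l with
  | nil => intro c _ _; simp [takeskipB_go]
  | cons x xs ih =>
    intro c hc hct
    have hk : (take - c).toNat = (take - (c + 1)).toNat + 1 := by omega
    simp only [takeskipB_go, if_pos hct, hk, List.take_succ_cons, List.drop_succ_cons]
    have hnr : ¬ take + skip ≤ c + 1 := by omega
    simp only [if_neg hnr]
    by_cases h1 : c + 1 < take
    · rw [ih (c + 1) (by omega) h1]; rfl
    · have h2 : (take - (c + 1)).toNat = 0 := by omega
      have h3 : c + 1 = take := by omega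
      simp [h3]

-- Main case: B's skip phase — from take ≤ c < take + skip it yields nothing on
-- the next (take + skip - c).toNat elements and resets the counter to 0.
theorem goB_skip_phase (take skip : Int) :
    ∀ l c, take ≤ c → c < take + skip →
      takeskipB_go take skip l c =
        takeskipB_go take skip (l.drop (take + skip - c).toNat) 0 := by
  intro l
  induction l with
  | nil => intro c _ _; simp [takeskipB_go]
  | cons x xs ih =>
    intro c hc hcs
    have hny : ¬ c < take := by omega
    have hk : (take + skip - c).toNat = (take + skip - (c + 1)).toNat + 1 := by omega
    simp only [takeskipB_go, if_neg hny, List.nil_append, hk, List.drop_succ_cons]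
    by_cases hr : take + skip ≤ c + 1
    · have : (take + skip - (c + 1)).toNat = 0 := by omega
      simp [if_pos hr, this]
    · rw [if_neg hr, ih (c + 1) (by omega) (by omega)]

-- Main case: one round of A equals one take-phase plus one skip-phase of B.
theorem goA_eq_goB (take skip : Int) (ht : 0 < take) (hs : 0 < skip) :
    ∀ f l, List.length l < f →
      takeskipA_go take skip f l = takeskipB_go take skip l 0 := by
  intro f
  induction f with
  | zero => intro l h; omega
  | succ f ih =>
    intro l h
    have hround : takeskipB_go take skip l 0 =
        l.take take.toNat ++ takeskipB_go take skip ((l.drop take.toNat).drop skip.toNat) 0 := by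
      rw [goB_take_phase take skip hs l 0 le_rfl ht]
      have h1 : (take - 0).toNat = take.toNat := by omega
      have h2 : (take + skip - take).toNat = skip.toNat := by omega
      rw [h1, goB_skip_phase take skip _ take le_rfl (by omega), h2]
    simp only [takeskipA_go]
    split
    · rename_i h1
      have hd : l.drop take.toNat = [] := by
        apply List.eq_nil_of_length_eq_zero; simp; omega
      rw [hround, hd]
      simp [takeskipB_go, List.take_of_length_le (le_of_lt h1)]
    · split
      · rename_i h1 h2
        have hd : (l.drop take.toNat).drop skip.toNat = [] := by
          apply List.eq_nil_of_length_eq_zero; simp at *; omega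
        rw [hround, hd]; simp [takeskipB_go]
      · rename_i h1 h2
        simp only [List.length_drop] at h1 h2
        have ht0 : 0 < take.toNat := by omega
        have : ((l.drop take.toNat).drop skip.toNat).length < f := by
          simp only [List.length_drop]; omega
        rw [ih _ this, hround]

-- ===== VERDICT (by name: the statement is the Claim_ definition above) =====
theorem takeskip_spec : Claim_equal_takeskip := by
  intro it take skip _ hpre
  unfold Spec_takeskip takeskip takeskip_alt
  by_cases ht : 0 < take
  · by_cases hs : 0 < skip
    · exact goA_eq_goB take skip ht hs _ it (by omega)
    · rw [goA_skip_nonpos take skip ht (by omega) _ it (by omega),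
          goB_skip_nonpos take skip ht (by omega) it 0 le_rfl ht]
  · have hs : 0 < skip := by rcases hpre with h | h <;> omega
    rw [goA_take_nonpos take skip (by omega) hs _ it (by omega),
        goB_take_nonpos take skip (by omega) it 0 le_rfl]
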